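-- pv_equiv track=rewrite | github.com/MrBrasilMan/Arion | parser.py | link_list
-- ===== SOURCE A (Python) =====
-- def link_list(possiblelinkbody):
--   #This was a very complex function to write, and even I do not fully understand how it works. But it does (somewhat) and I am here to document it.
--   #First, get a list of functions
--   allchar = list(possiblelinkbody)
--   #Create a list to add all text to.
--   text_list = []
--   #PPossible href is True when < appears, possibly conveying that <> contains a link
--   possible_href = False
--   #Where it is followed by an a, which leads it to assume it to be a link. It could not be, but 9/10 times, this will display a link.
--   is_href = False
--   #For all charecters in the body
--   for char in allchar:
--     #If the letter is a(processes before removing possible href)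
--     if char.lower() == "a" and possible_href == True:
--       is_href = True
--     #Only scans one line looking for a, shuts down if it is not on the second one.
--     if possible_href == True:
--       possible_href = False
--     #If the charecter is equal to <, then flag it as a possible url.
--     if char == "<":
--       possible_href = True
--     #If the line ends, stop.
--     if char == ">" and is_href == True:
--       is_href = False
--       text_list.append("\n")
--     #Otherwise display the link for the person.
--     if is_href == True:
--       text_list.append(char)
--   str1 = ""
--   return str1.join(text_list)
-- ===== SOURCE B (Python) =====
-- def link_list(possiblelinkbody):
--     # Index scan: find each "<a", slice straight to the next ">" instead of
--     # walking char-by-char with flags.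
--     out = []
--     s = possiblelinkbody
--     n = len(s)
--     i = 0
--     while i < n - 1:
--         if s[i] == "<" and s[i + 1].lower() == "a":
--             j = s.find(">", i + 1)
--             if j == -1:
--                 out.append(s[i + 1:])
--                 break
--             out.append(s[i + 1:j] + "\n")
--             i = j + 1
--         else:
--             i += 1
--     return "".join(out)
-- ===== Notes on version B (the rewrite author's own statement) =====
-- stated objective: idiomatic
-- what changed: Replaces the char-by-char two-flag state machine with an index scan that jumps to each '<a' and slices the text straight through to the next '>' (str.find), joining the slices at the end.
import Mathlib
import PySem

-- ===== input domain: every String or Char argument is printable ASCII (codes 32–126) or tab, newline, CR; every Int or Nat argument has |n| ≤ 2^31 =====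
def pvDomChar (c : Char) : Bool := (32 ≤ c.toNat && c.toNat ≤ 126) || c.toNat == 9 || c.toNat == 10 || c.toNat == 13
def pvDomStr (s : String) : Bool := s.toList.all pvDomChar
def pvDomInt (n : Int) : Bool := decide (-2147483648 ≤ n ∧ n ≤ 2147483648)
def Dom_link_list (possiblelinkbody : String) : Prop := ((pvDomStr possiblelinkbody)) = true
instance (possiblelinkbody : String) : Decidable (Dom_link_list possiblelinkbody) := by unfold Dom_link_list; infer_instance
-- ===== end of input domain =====

-- B replaces A's two-flag character loop by an index scan (find '<a', slice to the next '>'); same return value, idiomatic rewrite.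

-- ===== PORT A =====
-- one iteration of A's for-loop body (state: text_list, possible_href, is_href)
def linkStep (st : List String × Bool × Bool) (char : Char) : List String × Bool × Bool :=
  let text_list := st.1
  let possible_href := st.2.1
  let is_href := st.2.2
  let is_href := if PySem.Chars.lowerChar char = 'a' ∧ possible_href = true then true else is_href
  let possible_href := if possible_href = true then false else possible_href
  let possible_href := if char = '<' then true else possible_href
  let p : Bool × List String :=
    if char = '>' ∧ is_href = true then (false, text_list ++ ["\n"]) else (is_href, text_list)
  let is_href := p.1
  let text_list := p.2
  let text_list := if is_href = true then text_list ++ [String.ofList [char]] else text_list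
  (text_list, possible_href, is_href)

def link_list (possiblelinkbody : String) : String :=
  let allchar := possiblelinkbody.toList
  let res := allchar.foldl linkStep ([], false, false)
  PySem.Str.join "" res.1

-- ===== PORT B =====
-- Source B's while loop: advance one char unless at "<a"; there slice to the next '>' (or the end)
def linkLoop : List Char → List String
  | [] => []
  | [_] => []
  | a :: c :: rest =>
    if a = '<' ∧ PySem.Chars.lowerChar c = 'a' then
      let pre := (c :: rest).takeWhile (fun x => x ≠ '>')
      let post := (c :: rest).dropWhile (fun x => x ≠ '>')
      if post = [] then [String.ofList pre]
      else String.ofList (pre ++ ['\n']) :: linkLoop post.tail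
    else linkLoop (c :: rest)
termination_by l => l.length
decreasing_by
  · have := List.length_dropWhile_le (fun x => x ≠ '>') (c :: rest)
    simp only [List.length_tail]
    simp at this ⊢
    omega
  · simp

def link_list_alt (possiblelinkbody : String) : String :=
  PySem.Str.join "" (linkLoop possiblelinkbody.toList)

-- ===== PRECONDITION & SPEC =====
def Spec_link_list (possiblelinkbody : String) (out : String) : Prop := out = link_list_alt possiblelinkbody
instance (possiblelinkbody : String) (out : String) : Decidable (Spec_link_list possiblelinkbody out) := by unfold Spec_link_list; infer_instance

-- ===== CLAIM (what is proved, stated in full; the proofs are below) =====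
def Claim_equal_link_list : Prop := ∀ (possiblelinkbody : String), Dom_link_list possiblelinkbody → Spec_link_list possiblelinkbody (link_list possiblelinkbody)

-- ===== LEMMAS AND PROOFS =====

-- character stream A appends from state (possible_href = ph, is_href = ih) while eating cs
def fA : List Char → Bool → Bool → List Char
  | [], _, _ => []
  | c :: cs, ph, ih =>
    let ih1 := if PySem.Chars.lowerChar c = 'a' ∧ ph = true then true else ih
    let ph3 := if c = '<' then true else false
    if c = '>' ∧ ih1 = true then '\n' :: fA cs ph3 false
    else if ih1 = true then c :: fA cs ph3 true
    else fA cs ph3 false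

theorem foldA_appended (cs : List Char) : ∀ (acc : List String) (ph ih : Bool),
    ((cs.foldl linkStep (acc, ph, ih)).1.map String.toList).flatten
      = (acc.map String.toList).flatten ++ fA cs ph ih := by
  induction cs with
  | nil => intro acc ph ih; simp [fA]
  | cons c cs IH =>
    intro acc ph ih
    simp only [List.foldl_cons, linkStep, fA]
    split_ifs with h1 h2 h3 h4 h5 h6 <;> simp_all

theorem join_nil_flatten (ps : List (List Char)) : PySem.Chars.join [] ps = ps.flatten := by
  induction ps with
  | nil => simp [PySem.Chars.join_nil]
  | cons p ps IH =>
    cases ps with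
    | nil => simp [PySem.Chars.join_singleton]
    | cons q rest => simp [PySem.Chars.join_cons_cons, IH]

theorem fA_inside (cs : List Char) : ∀ (ph : Bool),
    fA cs ph true
      = cs.takeWhile (fun x => x ≠ '>')
        ++ (match cs.dropWhile (fun x => x ≠ '>') with
            | [] => []
            | _ :: rest => '\n' :: fA rest false false) := by
  induction cs with
  | nil => intro ph; simp [fA]
  | cons c cs IH =>
    intro ph
    by_cases hc : c = '>'
    · subst hc
      simp [fA]
    · simp [fA, hc, IH]

theorem fA_ph_irrel (c : Char) (cs : List Char) (h : PySem.Chars.lowerChar c ≠ 'a') :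
    fA (c :: cs) true false = fA (c :: cs) false false := by
  simp [fA, h]

theorem fA_eq_linkLoop_aux : ∀ (n : Nat) (cs : List Char), cs.length ≤ n →
    fA cs false false = ((linkLoop cs).map String.toList).flatten := by
  intro n
  induction n with
  | zero =>
    intro cs h
    have : cs = [] := by cases cs <;> simp_all
    subst this; simp [fA, linkLoop]
  | succ n IH =>
    intro cs hlen
    match cs with
    | [] => simp [fA, linkLoop]
    | [x] =>
      simp [fA, linkLoop]
    | a :: c :: rest =>
      by_cases hcond : a = '<' ∧ PySem.Chars.lowerChar c = 'a'
      · obtain ⟨ha, hc⟩ := hcond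
        subst ha
        have hcne : c ≠ '>' := by
          intro h; subst h; exact absurd hc (by decide)
        -- A side: step through '<' then through c
        have step1 : fA ('<' :: c :: rest) false false = fA (c :: rest) true false := by
          simp [fA]
        have step2 : fA (c :: rest) true false = c :: fA rest (if c = '<' then true else false) true := by
          simp [fA, hc, hcne]
        rw [step1, step2, fA_inside]
        -- B side
        rw [linkLoop]
        cases hdrop : rest.dropWhile (fun x => x ≠ '>') with
        | nil =>
          have hall : ∀ x ∈ rest, ¬ x = '>' := by
            simpa using List.dropWhile_eq_nil_iff.mp hdrop
          simp [hc, hcne]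
          rw [if_pos hall]
          simp
        | cons y rest' =>
          have hr' : rest'.length ≤ n := by
            have := List.length_dropWhile_le (fun x => x ≠ '>') rest
            rw [hdrop] at this
            simp at this hlen
            omega
          have hnall : ¬ ∀ x ∈ rest, ¬ x = '>' := by
            intro hall
            have hnil : List.dropWhile (fun x => x ≠ '>') rest = [] := by
              rw [List.dropWhile_eq_nil_iff]; simpa using hall
            rw [hnil] at hdrop
            exact List.cons_ne_nil y rest' hdrop.symm
          simp only [ne_eq, decide_not] at hdrop
          simp [hc, hcne]
          rw [if_neg hnall]
          simp [hdrop, IH rest' hr']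
      · rw [linkLoop]
        simp only [if_neg hcond]
        have hA : fA (a :: c :: rest) false false = fA (c :: rest) (if a = '<' then true else false) false := by
          simp [fA]
        rw [hA]
        have htail : fA (c :: rest) (if a = '<' then true else false) false = fA (c :: rest) false false := by
          by_cases ha : a = '<'
          · have hc : PySem.Chars.lowerChar c ≠ 'a' := fun h => hcond ⟨ha, h⟩
            simp [ha, fA_ph_irrel c rest hc]
          · simp [ha]
        rw [htail]
        exact IH (c :: rest) (by simp at hlen ⊢; omega)

-- ===== VERDICT (by name: the statement is the Claim_ definition above) =====
theorem link_list_spec : Claim_equal_link_list := by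
  intro s _
  unfold Spec_link_list link_list link_list_alt
  apply String.toList_inj.mp
  rw [PySem.Str.toList_join, PySem.Str.toList_join]
  have he : ("" : String).toList = [] := rfl
  rw [he, join_nil_flatten, join_nil_flatten]
  have hA := foldA_appended s.toList [] false false
  simp only [List.map_nil, List.flatten_nil, List.nil_append] at hA
  rw [hA, fA_eq_linkLoop_aux s.toList.length s.toList le_rfl]
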